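-- pv_equiv track=rewrite | github.com/GHraylly/removeInvalidParentheses | Remove Invalid Parenrheses.py | deletePairingParesFromBehind
-- ===== SOURCE A (Python) =====
-- def deletePairingParesFromBehind(sslist):
--     #从后向前，为每一个’（‘配对最远的‘）’
--     """
--     delete Pairing Parentheses between p1 and p2
--     :param sslist: list
--     :return: list, baleen
--     """
--     changeMark = False
--     slist = list(sslist)
--     i = len(slist)-1
--     for character in slist[::-1]:#倒序character
--         if character == '(':
--             j = len(slist)-1
--             if j >= -1:
--                 while j >= i:
--                     if slist[j] == ')':
--                         slist[i] = ''
--                         slist[j] = ''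
--                         changeMark = True
--                         break
--                     j -= 1
--                     if j <= -1:
--                         break
--         i -= 1
--     return slist, changeMark
-- ===== SOURCE B (Python) =====
-- def deletePairingParesFromBehind(sslist):
--     """One pass right-to-left with a pointer into the pre-collected, descending
--     list of ')' positions: the maximum still-available ')' is always the next
--     pointer entry, so no inner rightward rescan is needed."""
--     slist = list(sslist)
--     closes = [j for j in range(len(slist) - 1, -1, -1) if slist[j] == ')']
--     k = 0
--     changeMark = False
--     for i in range(len(slist) - 1, -1, -1):
--         if slist[i] == '(' and k < len(closes) and closes[k] > i:
--             j = closes[k]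
--             k += 1
--             slist[i] = ''
--             slist[j] = ''
--             changeMark = True
--     return slist, changeMark
-- ===== Notes on version B (the rewrite author's own statement) =====
-- stated objective: alternative
-- what changed: Replaced A's per-'(' rightward rescan of the whole list by one pre-collected descending list of ')' positions consumed by a single advancing pointer, so each '(' is matched without an inner scan.
import Mathlib
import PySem

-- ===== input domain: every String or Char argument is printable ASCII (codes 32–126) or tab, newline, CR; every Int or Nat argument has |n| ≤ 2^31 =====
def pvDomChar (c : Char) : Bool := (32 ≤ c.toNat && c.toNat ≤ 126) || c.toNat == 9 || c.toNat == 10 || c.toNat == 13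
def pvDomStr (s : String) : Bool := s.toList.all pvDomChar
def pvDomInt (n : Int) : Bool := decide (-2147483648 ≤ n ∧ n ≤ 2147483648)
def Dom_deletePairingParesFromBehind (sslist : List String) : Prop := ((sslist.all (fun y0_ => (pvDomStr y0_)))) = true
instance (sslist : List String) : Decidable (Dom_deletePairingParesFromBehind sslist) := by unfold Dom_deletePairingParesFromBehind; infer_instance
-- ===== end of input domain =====

-- B replaces A's per-'(' rightward rescan by a pre-collected descending list of ')' positions
-- consumed by an advancing pointer (an alternative single-pass algorithm); return values are proved equal.

-- ===== PORT A =====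
-- inner `while j >= i` scan of A: from j down to i, blank the first ')' found.
-- (Python's `if j >= -1` guard is always true; its `j <= -1` break is the `j = 0` test here,
-- since i is a non-negative index whenever this loop runs.)
def pvInnerA (slist : List String) (i j : Nat) : List String × Bool :=
  if i ≤ j then
    if slist.getD j "" = ")" then ((slist.set i "").set j "", true)
    else if j = 0 then (slist, false)
    else pvInnerA slist i (j - 1)
  else (slist, false)
termination_by j
decreasing_by omega

-- outer `for character in slist[::-1]` loop of A: orig is the remaining part of the reversed
-- snapshot, i the current index (orig.length = i+1 whenever orig ≠ []).
def pvLoopA (orig : List String) (slist : List String) (i : Nat) (mark : Bool) :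
    List String × Bool :=
  match orig with
  | [] => (slist, mark)
  | c :: rest =>
    if c = "(" then
      let r := pvInnerA slist i (slist.length - 1)
      pvLoopA rest r.1 (i - 1) (r.2 || mark)
    else pvLoopA rest slist (i - 1) mark

def deletePairingParesFromBehind (sslist : List String) : List String × Bool :=
  pvLoopA sslist.reverse sslist (sslist.length - 1) false

-- ===== PORT B =====
-- `[j for j in range(len(slist)-1, -1, -1) if slist[j] == ')']` of Source B
def pvCloses (slist : List String) : List Nat :=
  (List.range slist.length).reverse.filter (fun j => decide (slist.getD j "" = ")"))

-- `for i in range(len(slist)-1, -1, -1)` loop of Source B; closes is the not-yet-consumed suffix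
-- of the position list (Source B's advancing pointer k), fuel = i+1.
def pvLoopB (fuel : Nat) (slist : List String) (closes : List Nat) (mark : Bool) :
    List String × Bool :=
  match fuel with
  | 0 => (slist, mark)
  | Nat.succ i =>
    if slist.getD i "" = "(" then
      match closes with
      | [] => pvLoopB i slist [] mark
      | j :: rest =>
        if i < j then pvLoopB i ((slist.set i "").set j "") rest true
        else pvLoopB i slist (j :: rest) mark
    else pvLoopB i slist closes mark

def deletePairingParesFromBehind_alt (sslist : List String) : List String × Bool :=
  pvLoopB sslist.length sslist (pvCloses sslist) false

-- ===== PRECONDITION & SPEC =====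
def Spec_deletePairingParesFromBehind (sslist : List String) (out : List String × Bool) : Prop := out = deletePairingParesFromBehind_alt sslist
instance (sslist : List String) (out : List String × Bool) : Decidable (Spec_deletePairingParesFromBehind sslist out) := by unfold Spec_deletePairingParesFromBehind; infer_instance

-- ===== CLAIM (what is proved, stated in full; the proofs are below) =====
def Claim_equal_deletePairingParesFromBehind : Prop := ∀ (sslist : List String), Dom_deletePairingParesFromBehind sslist → Spec_deletePairingParesFromBehind sslist (deletePairingParesFromBehind sslist)

-- ===== LEMMAS AND PROOFS =====

theorem pvGetD_set_ne (l : List String) (a p : Nat) (v : String) (h : a ≠ p) :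
    (l.set a v).getD p "" = l.getD p "" := by
  rw [List.getD_eq_getElem?_getD, List.getD_eq_getElem?_getD, List.getElem?_set_ne h]

theorem pvGetD_set_self (l : List String) (a : Nat) (v : String) (h : a < l.length) :
    (l.set a v).getD a "" = v := by
  have h2 : (l.set a v)[a]? = some v := by simp [h]
  rw [List.getD_eq_getElem?_getD, h2]
  rfl

theorem pvTakeSuccRev (l : List String) (k : Nat) (h : k < l.length) :
    (l.take (k+1)).reverse = l.getD k "" :: (l.take k).reverse := by
  have h1 : l[k]? = some l[k] := List.getElem?_eq_getElem h
  rw [List.take_add_one, h1, List.getD_eq_getElem?_getD, h1]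
  simp

theorem pvCloses_mem (slist : List String) (x : Nat) :
    x ∈ pvCloses slist ↔ x < slist.length ∧ slist.getD x "" = ")" := by
  simp [pvCloses, List.mem_filter]

theorem pvCloses_pairwise (slist : List String) : (pvCloses slist).Pairwise (· > ·) := by
  have h1 : ((List.range slist.length).reverse).Pairwise (fun a b => a > b) :=
    List.pairwise_reverse.mpr (by simpa using List.pairwise_lt_range)
  exact h1.filter _

theorem pvCloses_nil (slist : List String) (hcl : pvCloses slist = []) :
    ∀ p, p < slist.length → slist.getD p "" ≠ ")" := by
  intro p hpn hc
  have : p ∈ pvCloses slist := (pvCloses_mem _ _).mpr ⟨hpn, hc⟩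
  simp [hcl] at this

theorem pvCloses_max (slist : List String) (j : Nat) (rest : List Nat)
    (hcl : pvCloses slist = j :: rest) :
    ∀ p, j < p → p < slist.length → slist.getD p "" ≠ ")" := by
  intro p hp hpn hc
  have hpmem : p ∈ pvCloses slist := (pvCloses_mem _ _).mpr ⟨hpn, hc⟩
  rw [hcl] at hpmem
  rcases List.mem_cons.mp hpmem with h | h
  · omega
  · have := (List.pairwise_cons.mp (hcl ▸ pvCloses_pairwise slist)).1 p h
    omega

theorem pvCloses_consume (slist : List String) (k j : Nat) (rest : List Nat)
    (hk : k < slist.length) (hko : slist.getD k "" = "(")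
    (hcl : pvCloses slist = j :: rest) :
    pvCloses ((slist.set k "").set j "") = rest := by
  have hjmem : j ∈ pvCloses slist := by rw [hcl]; exact List.mem_cons_self
  have hjn : j < slist.length := ((pvCloses_mem _ _).mp hjmem).1
  have hjrest : ∀ x ∈ rest, x ≠ j := by
    intro x hx
    have := (List.pairwise_cons.mp (hcl ▸ pvCloses_pairwise slist)).1 x hx
    omega
  have hcl' := hcl
  unfold pvCloses at hcl' ⊢
  have hlen : ((slist.set k "").set j "").length = slist.length := by simp
  rw [hlen]
  have hcong : ((List.range slist.length).reverse).filter
        (fun x => decide (((slist.set k "").set j "").getD x "" = ")"))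
      = ((List.range slist.length).reverse).filter
        (fun x => decide (x ≠ j) && decide (slist.getD x "" = ")")) := by
    apply List.filter_congr
    intro x _
    by_cases hxj : x = j
    · subst hxj
      have hx0 : ((slist.set k "").set x "").getD x "" = "" :=
        pvGetD_set_self _ _ _ (by simpa using hjn)
      rw [hx0]
      simp
    · by_cases hxk : x = k
      · subst hxk
        have h1 : ((slist.set x "").set j "").getD x "" = (slist.set x "").getD x "" :=
          pvGetD_set_ne _ _ _ _ (Ne.symm hxj)
        have h2 : (slist.set x "").getD x "" = "" := pvGetD_set_self _ _ _ hk
        rw [h1, h2, hko]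
        simp
      · have h1 : ((slist.set k "").set j "").getD x "" = slist.getD x "" := by
          rw [pvGetD_set_ne _ _ _ _ (Ne.symm hxj), pvGetD_set_ne _ _ _ _ (Ne.symm hxk)]
        rw [h1]
        simp [hxj]
  rw [hcong, ← List.filter_filter, hcl', List.filter_cons_of_neg (by simp)]
  exact List.filter_eq_self.mpr (fun x hx => by simp [hjrest x hx])

theorem pvInnerA_none : ∀ (m : Nat) (slist : List String) (i : Nat),
    (∀ j, i ≤ j → j ≤ m → slist.getD j "" ≠ ")") → pvInnerA slist i m = (slist, false) := by
  intro m
  induction m using Nat.strong_induction_on with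
  | _ m IH =>
    intro slist i h
    rw [pvInnerA.eq_def]
    by_cases him : i ≤ m
    · rw [if_pos him, if_neg (h m him le_rfl)]
      by_cases hm : m = 0
      · rw [if_pos hm]
      · rw [if_neg hm]
        exact IH (m-1) (by omega) slist i (fun j hj1 hj2 => h j hj1 (by omega))
    · rw [if_neg him]

theorem pvInnerA_find : ∀ (m : Nat) (slist : List String) (i j : Nat),
    i ≤ j → j ≤ m → slist.getD j "" = ")" →
    (∀ p, j < p → p ≤ m → slist.getD p "" ≠ ")") →
    pvInnerA slist i m = ((slist.set i "").set j "", true) := by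
  intro m
  induction m using Nat.strong_induction_on with
  | _ m IH =>
    intro slist i j hij hjm hj hmax
    rw [pvInnerA.eq_def, if_pos (le_trans hij hjm)]
    by_cases hm : slist.getD m "" = ")"
    · have hjem : j = m := by
        by_contra hne
        exact hmax m (by omega) le_rfl hm
      subst hjem
      rw [if_pos hm]
    · have hjltm : j < m := lt_of_le_of_ne hjm (fun e => hm (e ▸ hj))
      rw [if_neg hm, if_neg (by omega : ¬ m = 0)]
      exact IH (m-1) (by omega) slist i j hij (by omega) hj
        (fun p hp1 hp2 => hmax p hp1 (by omega))

theorem pvMain (sslist : List String) : ∀ (i' : Nat) (slist : List String) (mark : Bool),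
    slist.length = sslist.length → i' ≤ sslist.length →
    (∀ p, p < i' → slist.getD p "" = sslist.getD p "") →
    pvLoopA ((sslist.take i').reverse) slist (i' - 1) mark
      = pvLoopB i' slist (pvCloses slist) mark := by
  intro i'
  induction i' with
  | zero => intro slist mark _ _ _; simp [pvLoopA, pvLoopB]
  | succ k IH =>
    intro slist mark hlen hle hpre
    have hkn : k < sslist.length := by omega
    have hck : slist.getD k "" = sslist.getD k "" := hpre k (by omega)
    rw [pvTakeSuccRev sslist k hkn, ← hck]
    by_cases hc : slist.getD k "" = "("
    · cases hcl : pvCloses slist with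
      | nil =>
        have hnone : pvInnerA slist k (slist.length - 1) = (slist, false) :=
          pvInnerA_none _ _ _ (fun j' _ hj2 => pvCloses_nil slist hcl j' (by omega))
        simp only [pvLoopA, pvLoopB, if_pos hc, hnone, Bool.false_or, Nat.add_sub_cancel]
        have h := IH slist mark hlen (by omega) (fun p hp => hpre p (by omega))
        rw [hcl] at h
        exact h
      | cons j rest' =>
        have hjmem : j ∈ pvCloses slist := by rw [hcl]; exact List.mem_cons_self
        have hjn : j < slist.length := ((pvCloses_mem _ _).mp hjmem).1
        have hjv : slist.getD j "" = ")" := ((pvCloses_mem _ _).mp hjmem).2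
        by_cases hkj : k < j
        · have hfind : pvInnerA slist k (slist.length - 1) = ((slist.set k "").set j "", true) :=
            pvInnerA_find _ _ _ _ (by omega) (by omega) hjv
              (fun p hp1 hp2 => pvCloses_max slist j rest' hcl p hp1 (by omega))
          simp only [pvLoopA, pvLoopB, if_pos hc, if_pos hkj, hfind, Bool.true_or,
            Nat.add_sub_cancel]
          have h := IH ((slist.set k "").set j "") true (by simp [hlen])
            (by omega)
            (fun p hp => by
              rw [pvGetD_set_ne _ _ _ _ (by omega : j ≠ p),
                pvGetD_set_ne _ _ _ _ (by omega : k ≠ p)]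
              exact hpre p (by omega))
          rw [pvCloses_consume slist k j rest' (by omega) hc hcl] at h
          exact h
        · have hjk : j < k := by
            rcases Nat.lt_or_ge j k with h | h
            · exact h
            · have : j = k := by omega
              rw [this, hc] at hjv
              exact absurd hjv (by decide)
          have hnone : pvInnerA slist k (slist.length - 1) = (slist, false) :=
            pvInnerA_none _ _ _
              (fun j' hj1 hj2 => pvCloses_max slist j rest' hcl j' (by omega) (by omega))
          simp only [pvLoopA, pvLoopB, if_pos hc, if_neg hkj, hnone, Bool.false_or,
            Nat.add_sub_cancel]
          have h := IH slist mark hlen (by omega) (fun p hp => hpre p (by omega))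
          rw [hcl] at h
          exact h
    · simp only [pvLoopA, pvLoopB, if_neg hc, Nat.add_sub_cancel]
      exact IH slist mark hlen (by omega) (fun p hp => hpre p (by omega))

-- ===== VERDICT (by name: the statement is the Claim_ definition above) =====
theorem deletePairingParesFromBehind_spec : Claim_equal_deletePairingParesFromBehind := by
  intro sslist _
  unfold Spec_deletePairingParesFromBehind deletePairingParesFromBehind
    deletePairingParesFromBehind_alt
  have h := pvMain sslist sslist.length sslist false rfl le_rfl (fun p _ => rfl)
  rw [List.take_length] at h
  exact h
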